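-- pv_equiv track=rewrite | github.com/heurist-network/miner-release | llm_mining_core/utils/decoder_utils.py | decode_prompt_mistral
-- ===== SOURCE A (Python) =====
-- def decode_prompt_mistral(encoded_prompt):
--     """
--     Decodes and processes the encoded prompt for Mistral models.
--
--     Args:
--         encoded_prompt (str): The encoded prompt string.
--
--     Returns:
--         list of dicts: A list where each item is a dictionary representing a message with 'role' and 'content' keys.
--     """
--     inst_start = "[INST]"
--     inst_end = "[/INST]"
--     assistant_end = "</s>"
--
--     messages = []
--     segments = encoded_prompt.split(inst_start)
--
--     for segment in segments[1:]:  # Skip the initial empty segment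
--         if inst_end in segment:
--             end_index = segment.find(inst_end)
--             user_prompt = segment[:end_index].strip()
--             following_content = segment[end_index + len(inst_end):].strip()
--
--             if assistant_end in following_content:
--                 assistant_message_end_index = following_content.find(assistant_end)
--                 assistant_message = following_content[:assistant_message_end_index].strip()
--             else:
--                 assistant_message = following_content
--
--             messages.append({"role": "user", "content": user_prompt})
--             if assistant_message:
--                 messages.append({"role": "assistant", "content": assistant_message})
--
--     return messages
-- ===== SOURCE B (Python) =====
-- def decode_prompt_mistral(encoded_prompt):
--     """Single left-to-right index scan over the string with str.find bounds;
--     never materializes the split segments."""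
--     messages = []
--     n = len(encoded_prompt)
--     i = encoded_prompt.find("[INST]")
--     while i != -1:
--         start = i + 6
--         nxt = encoded_prompt.find("[INST]", start)
--         end = n if nxt == -1 else nxt
--         k = encoded_prompt.find("[/INST]", start, end)
--         if k != -1:
--             messages.append({"role": "user", "content": encoded_prompt[start:k].strip()})
--             tail = encoded_prompt[k + 7:end].strip()
--             if "</s>" in tail:
--                 tail = tail[:tail.find("</s>")].strip()
--             if tail:
--                 messages.append({"role": "assistant", "content": tail})
--         i = nxt
--     return messages
-- ===== Notes on version B (the rewrite author's own statement) =====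
-- stated objective: alternative
-- what changed: A splits the prompt on the instruction-start marker into a list of segment strings and post-processes each segment with in/find/slices; B never materializes segments: it walks the original string once with index-based bounded str.find calls and slices the user and assistant texts straight out of the input.
import Mathlib
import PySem

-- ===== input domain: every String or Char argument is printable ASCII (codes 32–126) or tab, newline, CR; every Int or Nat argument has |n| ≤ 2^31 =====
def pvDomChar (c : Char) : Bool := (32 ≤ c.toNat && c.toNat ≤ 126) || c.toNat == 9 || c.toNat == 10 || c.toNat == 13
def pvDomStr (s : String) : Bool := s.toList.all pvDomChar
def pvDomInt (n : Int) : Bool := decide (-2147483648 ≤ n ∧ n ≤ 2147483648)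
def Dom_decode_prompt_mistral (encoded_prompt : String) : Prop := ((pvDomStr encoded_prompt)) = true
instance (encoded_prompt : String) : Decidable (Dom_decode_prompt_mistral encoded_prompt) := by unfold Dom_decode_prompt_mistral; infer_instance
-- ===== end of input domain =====

-- B replaces split-into-segment-strings + per-segment find/slice by one index-based scan
-- over the original string with bounded str.find; objective: alternative.

def pvInst : List Char := "[INST]".toList
def pvInstEnd : List Char := "[/INST]".toList
def pvEos : List Char := "</s>".toList

-- ===== PORT A =====
def decode_prompt_mistral (encoded_prompt : String) : List (List (String × String)) :=
  let segments := PySem.Chars.splitOn encoded_prompt.toList pvInst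
  (PySem.List.slice segments (some 1) none).foldl
    (fun messages segment =>
      if PySem.Chars.isIn pvInstEnd segment then
        let end_index := PySem.Chars.find segment pvInstEnd
        let user_prompt := PySem.Chars.strip (PySem.Chars.slice segment none (some end_index))
        let following_content := PySem.Chars.strip (PySem.Chars.slice segment (some (end_index + 7)) none)
        let assistant_message :=
          if PySem.Chars.isIn pvEos following_content then
            PySem.Chars.strip (PySem.Chars.slice following_content none
              (some (PySem.Chars.find following_content pvEos)))
          else following_content
        let messages := messages ++ [[("role", "user"), ("content", String.ofList user_prompt)]]
        if assistant_message.isEmpty then messages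
        else messages ++ [[("role", "assistant"), ("content", String.ofList assistant_message)]]
      else messages) []

-- ===== PORT B =====
-- the while-loop of Source B; fuel (= len s + 1) only makes the loop total, each
-- iteration advances i by at least 6
def pvGoB (s : List Char) (fuel : Nat) (i : Int) (acc : List (List (String × String))) :
    List (List (String × String)) :=
  match fuel with
  | 0 => acc
  | fuel + 1 =>
    if i = -1 then acc
    else
      let start := i + 6
      let nxt := PySem.Chars.findFrom s pvInst start
      let e := if nxt = -1 then (s.length : Int) else nxt
      let k := PySem.Chars.findFrom s pvInstEnd start (some e)
      let acc' :=
        if k = -1 then acc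
        else
          let user := PySem.Chars.strip (PySem.Chars.slice s (some start) (some k))
          let tail0 := PySem.Chars.strip (PySem.Chars.slice s (some (k + 7)) (some e))
          let tail :=
            if PySem.Chars.isIn pvEos tail0 then
              PySem.Chars.strip (PySem.Chars.slice tail0 none (some (PySem.Chars.find tail0 pvEos)))
            else tail0
          (acc ++ [[("role", "user"), ("content", String.ofList user)]]) ++
            (if tail.isEmpty then [] else [[("role", "assistant"), ("content", String.ofList tail)]])
      pvGoB s fuel nxt acc'

def decode_prompt_mistral_alt (encoded_prompt : String) : List (List (String × String)) :=
  let s := encoded_prompt.toList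
  pvGoB s (s.length + 1) (PySem.Chars.find s pvInst) []

-- ===== PRECONDITION & SPEC =====
def Spec_decode_prompt_mistral (encoded_prompt : String) (out : List (List (String × String))) : Prop := out = decode_prompt_mistral_alt encoded_prompt
instance (encoded_prompt : String) (out : List (List (String × String))) : Decidable (Spec_decode_prompt_mistral encoded_prompt out) := by unfold Spec_decode_prompt_mistral; infer_instance

-- ===== CLAIM (what is proved, stated in full; the proofs are below) =====
def Claim_equal_decode_prompt_mistral : Prop := ∀ (encoded_prompt : String), Dom_decode_prompt_mistral encoded_prompt → Spec_decode_prompt_mistral encoded_prompt (decode_prompt_mistral encoded_prompt)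

-- ===== LEMMAS AND PROOFS =====

-- reference splitter: split on "[INST]" as a plain structural recursion
def pvSplitInst : List Char → List (List Char)
  | [] => [[]]
  | c :: rest =>
    if pvInst.isPrefixOf (c :: rest) then
      [] :: pvSplitInst (rest.drop 5)
    else
      match pvSplitInst rest with
      | [] => [[c]]
      | h :: t => (c :: h) :: t
termination_by l => l.length
decreasing_by
  · simp [List.length_drop]
  · simp

lemma pvSplitInst_ne_nil (l : List Char) : pvSplitInst l ≠ [] := by
  induction l using pvSplitInst.induct with
  | case1 => simp [pvSplitInst]
  | case2 c rest h ih => simp [pvSplitInst, h]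
  | case3 c rest h heq => simp [pvSplitInst, h, heq]
  | case4 c rest h hh ht heq => simp [pvSplitInst, h, heq]

lemma pvFindGo_shift (sub : List Char) : ∀ (l : List Char) (k : Nat),
    PySem.Chars.find.go sub l k =
      if PySem.Chars.find.go sub l 0 = -1 then -1 else PySem.Chars.find.go sub l 0 + k := by
  intro l
  induction l with
  | nil => intro k; simp [PySem.Chars.find.go]; split <;> simp
  | cons c rest ih =>
    intro k
    have hge : -1 ≤ PySem.Chars.find.go sub rest 0 := by
      have := PySem.Chars.neg_one_le_find rest sub
      simpa [PySem.Chars.find] using this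
    rw [PySem.Chars.find.go]
    conv_rhs => rw [PySem.Chars.find.go]
    by_cases hp : sub.isPrefixOf (c :: rest)
    · simp [hp]
    · simp [hp, ih (k+1), ih 1]
      split <;> split <;> omega

lemma pvFind_nil (sub : List Char) (h : sub ≠ []) : PySem.Chars.find [] sub = -1 := by
  simp [PySem.Chars.find, PySem.Chars.find.go, h]


lemma pvFind_cons (sub : List Char) (c : Char) (rest : List Char) :
    PySem.Chars.find (c :: rest) sub =
      if sub.isPrefixOf (c :: rest) then 0
      else if PySem.Chars.find rest sub = -1 then -1 else PySem.Chars.find rest sub + 1 := by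
  rw [PySem.Chars.find, PySem.Chars.find.go]
  by_cases hp : sub.isPrefixOf (c :: rest)
  · simp [hp]
  · simp [hp, pvFindGo_shift sub rest 1, PySem.Chars.find]


lemma pvSplitInst_eq_find (l : List Char) :
    pvSplitInst l =
      if PySem.Chars.find l pvInst = -1 then [l]
      else l.take (PySem.Chars.find l pvInst).toNat ::
        pvSplitInst (l.drop ((PySem.Chars.find l pvInst).toNat + 6)) := by
  induction l using pvSplitInst.induct with
  | case1 => simp [pvSplitInst, pvFind_nil pvInst (by decide)]
  | case2 c rest h =>
    rw [pvFind_cons, if_pos h]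
    simp [pvSplitInst, h]
  | case3 c rest h heq ih =>
    exact absurd heq (pvSplitInst_ne_nil rest)
  | case4 c rest h hh ht heq ih =>
    have hge := PySem.Chars.neg_one_le_find rest pvInst
    rw [pvFind_cons, if_neg h]
    by_cases hr : PySem.Chars.find rest pvInst = -1
    · rw [ih, if_pos hr] at heq
      simp only [List.cons.injEq] at heq
      simp [pvSplitInst, h, ih, hr]
    · rw [ih, if_neg hr] at heq
      have h0 : 0 ≤ PySem.Chars.find rest pvInst := by omega
      have ht1 : (PySem.Chars.find rest pvInst + 1).toNat
          = (PySem.Chars.find rest pvInst).toNat + 1 := by omega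
      have hne : ¬ (if PySem.Chars.find rest pvInst = -1 then (-1 : Int)
          else PySem.Chars.find rest pvInst + 1) = -1 := by
        rw [if_neg hr]; omega
      rw [if_neg hne, if_neg hr, ht1]
      simp only [List.take_succ_cons, List.drop_succ_cons]
      have : (PySem.Chars.find rest pvInst).toNat + 1 + 6 - 1
          = (PySem.Chars.find rest pvInst).toNat + 6 := by omega
      cases heq
      simp [pvSplitInst, h, ih, if_neg hr]


lemma pvGoSplit : ∀ (n : Nat) (l : List Char), l.length ≤ n →
    ∀ (fuel : Nat) (cur : List Char) (acc : List (List Char)), l.length < fuel →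
    PySem.Chars.splitOn.go pvInst fuel l cur acc =
      acc.reverse ++ (match pvSplitInst l with
        | [] => [cur.reverse]
        | h :: t => (cur.reverse ++ h) :: t) := by
  intro n
  induction n with
  | zero =>
    intro l hl fuel cur acc hf
    have : l = [] := by cases l <;> simp_all
    subst this
    cases fuel with
    | zero => omega
    | succ fuel => simp [PySem.Chars.splitOn.go, pvSplitInst]
  | succ n ih =>
    intro l hl fuel cur acc hf
    cases fuel with
    | zero => omega
    | succ fuel =>
      cases l with
      | nil => simp [PySem.Chars.splitOn.go, pvSplitInst]
      | cons c rest =>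
        rw [PySem.Chars.splitOn.go]
        by_cases hp : pvInst.isPrefixOf (c :: rest)
        · rw [if_pos hp]
          have h6 : pvInst.length = 6 := by decide
          have hlen : (List.drop pvInst.length (c :: rest)).length ≤ n := by
            simp [h6] at hl ⊢; omega
          have hflen : (List.drop pvInst.length (c :: rest)).length < fuel := by
            simp [h6] at hf ⊢; omega
          rw [ih _ hlen fuel [] (cur.reverse :: acc) hflen]
          obtain ⟨h, t, heq⟩ : ∃ h t, pvSplitInst (List.drop 5 rest) = h :: t := by
            rcases hx : pvSplitInst (List.drop 5 rest) with _ | ⟨h, t⟩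
            · exact absurd hx (pvSplitInst_ne_nil _)
            · exact ⟨h, t, rfl⟩
          have hdrop : List.drop pvInst.length (c :: rest) = List.drop 5 rest := by
            rw [h6]; rfl
          rw [hdrop]
          simp [pvSplitInst, hp, heq]
        · rw [if_neg hp]
          have hlen : rest.length ≤ n := by simp at hl; omega
          have hflen : rest.length < fuel := by simp at hf; omega
          rw [ih rest hlen fuel (c :: cur) acc hflen]
          obtain ⟨h, t, heq⟩ : ∃ h t, pvSplitInst rest = h :: t := by
            rcases hx : pvSplitInst rest with _ | ⟨h, t⟩
            · exact absurd hx (pvSplitInst_ne_nil _)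
            · exact ⟨h, t, rfl⟩
          simp [pvSplitInst, hp, heq]


lemma pvSplitOn_eq (l : List Char) : PySem.Chars.splitOn l pvInst = pvSplitInst l := by
  rw [PySem.Chars.splitOn, pvGoSplit l.length l le_rfl (l.length + 1) [] [] (by omega)]
  rcases hx : pvSplitInst l with _ | ⟨h, t⟩
  · exact absurd hx (pvSplitInst_ne_nil l)
  · simp

def pvProcSeg (seg : List Char) : List (List (String × String)) :=
  if PySem.Chars.isIn pvInstEnd seg then
    let e := PySem.Chars.find seg pvInstEnd
    let user := PySem.Chars.strip (PySem.Chars.slice seg none (some e))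
    let following := PySem.Chars.strip (PySem.Chars.slice seg (some (e + 7)) none)
    let assistant :=
      if PySem.Chars.isIn pvEos following then
        PySem.Chars.strip (PySem.Chars.slice following none (some (PySem.Chars.find following pvEos)))
      else following
    [[("role", "user"), ("content", String.ofList user)]] ++
      (if assistant.isEmpty then [] else [[("role", "assistant"), ("content", String.ofList assistant)]])
  else []

lemma pvFoldA (segs : List (List Char)) (init : List (List (String × String))) :
    segs.foldl
      (fun messages segment =>
        if PySem.Chars.isIn pvInstEnd segment then
          let end_index := PySem.Chars.find segment pvInstEnd
          let user_prompt := PySem.Chars.strip (PySem.Chars.slice segment none (some end_index))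
          let following_content := PySem.Chars.strip (PySem.Chars.slice segment (some (end_index + 7)) none)
          let assistant_message :=
            if PySem.Chars.isIn pvEos following_content then
              PySem.Chars.strip (PySem.Chars.slice following_content none
                (some (PySem.Chars.find following_content pvEos)))
            else following_content
          let messages := messages ++ [[("role", "user"), ("content", String.ofList user_prompt)]]
          if assistant_message.isEmpty then messages
          else messages ++ [[("role", "assistant"), ("content", String.ofList assistant_message)]]
        else messages) init
    = init ++ segs.flatMap pvProcSeg := by
  induction segs generalizing init with
  | nil => simp
  | cons seg rest ih =>
    rw [List.foldl_cons, ih]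
    have hbody : ∀ (m : List (List (String × String))),
        (if PySem.Chars.isIn pvInstEnd seg then
          let end_index := PySem.Chars.find seg pvInstEnd
          let user_prompt := PySem.Chars.strip (PySem.Chars.slice seg none (some end_index))
          let following_content := PySem.Chars.strip (PySem.Chars.slice seg (some (end_index + 7)) none)
          let assistant_message :=
            if PySem.Chars.isIn pvEos following_content then
              PySem.Chars.strip (PySem.Chars.slice following_content none
                (some (PySem.Chars.find following_content pvEos)))
            else following_content
          let m' := m ++ [[("role", "user"), ("content", String.ofList user_prompt)]]
          if assistant_message.isEmpty then m'
          else m' ++ [[("role", "assistant"), ("content", String.ofList assistant_message)]]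
        else m) = m ++ pvProcSeg seg := by
      intro m
      simp only [pvProcSeg]
      split_ifs <;> simp
    rw [hbody, List.flatMap_cons, List.append_assoc]

lemma pvFindFromEnd (s sub : List Char) (a b : Nat) (hab : a ≤ b) (hb : b ≤ s.length) :
    PySem.Chars.findFrom s sub (a : Int) (some (b : Int)) =
      if PySem.Chars.find ((s.drop a).take (b - a)) sub = -1 then -1
      else (a : Int) + PySem.Chars.find ((s.drop a).take (b - a)) sub := by
  rw [PySem.Chars.findFrom]
  have h1 : ¬ ((s.length : Int) < (b : Int)) := by exact_mod_cast not_lt.mpr hb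
  have h2 : ¬ ((b : Int) < 0) := by omega
  have h3 : ¬ ((a : Int) < 0) := by omega
  have h4 : ¬ ((b : Int) < (a : Int)) := by exact_mod_cast not_lt.mpr hab
  simp only [h1, if_false, h2, h3, h4]
  have h5 : ((b : Int)).toNat = b := by omega
  have h6 : ((a : Int)).toNat = a := by omega
  rw [h5, h6, List.drop_take]

-- the acc-update of one pvGoB iteration, abstracted over start and end bound
def pvAccStep (s : List Char) (start e : Int) (acc : List (List (String × String))) :
    List (List (String × String)) :=
  let k := PySem.Chars.findFrom s pvInstEnd start (some e)
  if k = -1 then acc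
  else
    let user := PySem.Chars.strip (PySem.Chars.slice s (some start) (some k))
    let tail0 := PySem.Chars.strip (PySem.Chars.slice s (some (k + 7)) (some e))
    let tail :=
      if PySem.Chars.isIn pvEos tail0 then
        PySem.Chars.strip (PySem.Chars.slice tail0 none (some (PySem.Chars.find tail0 pvEos)))
      else tail0
    (acc ++ [[("role", "user"), ("content", String.ofList user)]]) ++
      (if tail.isEmpty then [] else [[("role", "assistant"), ("content", String.ofList tail)]])

lemma pvGoB_neg_one (s : List Char) (fuel : Nat) (acc : List (List (String × String))) :
    pvGoB s fuel (-1) acc = acc := by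
  cases fuel <;> simp [pvGoB]

lemma pvGoB_succ (s : List Char) (fuel : Nat) (i : Int) (acc : List (List (String × String)))
    (h : ¬ i = -1) :
    pvGoB s (fuel + 1) i acc =
      pvGoB s fuel (PySem.Chars.findFrom s pvInst (i + 6))
        (pvAccStep s (i + 6)
          (if PySem.Chars.findFrom s pvInst (i + 6) = -1 then (s.length : Int)
           else PySem.Chars.findFrom s pvInst (i + 6)) acc) := by
  rw [pvGoB, if_neg h]
  rfl

lemma pvAccStep_eq (s : List Char) (a eN : Nat) (ha : a ≤ eN) (he : eN ≤ s.length)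
    (acc : List (List (String × String))) :
    pvAccStep s (a : Int) (eN : Int) acc = acc ++ pvProcSeg ((s.drop a).take (eN - a)) := by
  have hseglen : ((s.drop a).take (eN - a)).length = eN - a := by
    simp [List.length_take, List.length_drop]; omega
  rw [pvAccStep, pvFindFromEnd s pvInstEnd a eN ha he]
  set seg := (s.drop a).take (eN - a) with hseg
  by_cases hk : PySem.Chars.find seg pvInstEnd = -1
  · rw [if_pos (by rw [if_pos hk])]
    have hnotin : PySem.Chars.isIn pvInstEnd seg = false := by
      simp [PySem.Chars.isIn, hk]
    simp [pvProcSeg, hnotin]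
  · have h0 : 0 ≤ PySem.Chars.find seg pvInstEnd := by
      have := PySem.Chars.neg_one_le_find seg pvInstEnd; omega
    set fk := (PySem.Chars.find seg pvInstEnd).toNat with hfk
    have hfke : PySem.Chars.find seg pvInstEnd = (fk : Int) := by omega
    have hfkle : fk + 7 ≤ eN - a := by
      have hpre := (PySem.Chars.find_spec h0).1
      have := hpre.length_le
      have h7 : pvInstEnd.length = 7 := by decide
      simp [h7, List.length_drop, hseglen] at this
      omega
    rw [if_neg (show ¬ (if PySem.Chars.find seg pvInstEnd = -1 then (-1:Int)
        else (a:Int) + PySem.Chars.find seg pvInstEnd) = -1 by rw [if_neg hk]; omega),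
      if_neg hk]
    -- the Int bounds as Nat casts
    have hc1 : (a : Int) + PySem.Chars.find seg pvInstEnd = ((a + fk : Nat) : Int) := by
      push_cast; omega
    have hc2 : ((a + fk : Nat) : Int) + 7 = ((a + fk + 7 : Nat) : Int) := by
      push_cast; ring
    rw [hc1, hc2]
    simp only [PySem.Chars.slice_eq_listSlice]
    -- user slice
    have huser : PySem.List.slice s (some ((a : Nat) : Int)) (some ((a + fk : Nat) : Int))
        = seg.take fk := by
      rw [PySem.List.slice_natCast, hseg, List.take_take]
      congr 1
      omega
    -- tail slice
    have htail : PySem.List.slice s (some ((a + fk + 7 : Nat) : Int)) (some ((eN : Nat) : Int))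
        = seg.drop (fk + 7) := by
      rw [PySem.List.slice_natCast, hseg, List.drop_take, List.drop_drop]
      congr 1
      omega
    have hisin : PySem.Chars.isIn pvInstEnd seg = true := by
      simp [PySem.Chars.isIn, hk]
    simp only [pvProcSeg, hisin, if_true]
    have hsliceA : PySem.Chars.slice seg none (some (PySem.Chars.find seg pvInstEnd))
        = seg.take fk := by
      rw [hfke]
      simp [PySem.Chars.slice_eq_listSlice, PySem.List.slice_to]
    have hsliceA2 : PySem.Chars.slice seg (some (PySem.Chars.find seg pvInstEnd + 7)) none
        = seg.drop (fk + 7) := by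
      rw [hfke]
      simp only [PySem.Chars.slice_eq_listSlice]
      have h7 : ((fk : Int) + 7) = ((fk + 7 : Nat) : Int) := by push_cast; ring
      rw [h7, PySem.List.slice_from_natCast]
    simp only [PySem.Chars.slice_eq_listSlice] at hsliceA hsliceA2 ⊢
    rw [huser, htail, hsliceA, hsliceA2]
    simp [List.append_assoc]

lemma pvMain (s : List Char) : ∀ (fuel j : Nat) (acc : List (List (String × String))),
    j ≤ s.length → s.length - j < fuel →
    pvGoB s fuel (PySem.Chars.findFrom s pvInst (j : Int) none) acc
      = acc ++ ((pvSplitInst (s.drop j)).drop 1).flatMap pvProcSeg := by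
  intro fuel
  induction fuel with
  | zero => intro j acc hj hf; omega
  | succ fuel ih =>
    intro j acc hj hf
    rw [PySem.Chars.findFrom_natCast s pvInst j hj]
    by_cases hfind : PySem.Chars.find (s.drop j) pvInst = -1
    · rw [if_pos hfind, pvGoB_neg_one]
      rw [pvSplitInst_eq_find, if_pos hfind]
      simp
    · rw [if_neg hfind]
      have h0 : 0 ≤ PySem.Chars.find (s.drop j) pvInst := by
        have := PySem.Chars.neg_one_le_find (s.drop j) pvInst; omega
      set fj := (PySem.Chars.find (s.drop j) pvInst).toNat with hfj
      have hc1 : (j : Int) + PySem.Chars.find (s.drop j) pvInst = ((j + fj : Nat) : Int) := by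
        push_cast; omega
      rw [hc1]
      have hP6 : j + fj + 6 ≤ s.length := by
        have hpre := (PySem.Chars.find_spec h0).1
        have := hpre.length_le
        have h6 : pvInst.length = 6 := by decide
        simp [h6, List.length_drop] at this
        omega
      rw [pvGoB_succ s fuel _ acc (by omega)]
      have hc2 : ((j + fj : Nat) : Int) + 6 = ((j + fj + 6 : Nat) : Int) := by push_cast; ring
      rw [hc2]
      rw [PySem.Chars.findFrom_natCast s pvInst (j + fj + 6) (by omega)]
      set a := j + fj + 6 with ha
      -- split of the full suffix: head is the user segment before position j + fj
      have hsplit : pvSplitInst (s.drop j) =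
          (s.drop j).take fj :: pvSplitInst (s.drop a) := by
        rw [pvSplitInst_eq_find (s.drop j), if_neg hfind, ← hfj, List.drop_drop,
          show j + (fj + 6) = a by omega]
      rw [hsplit]
      simp only [List.drop_succ_cons, List.drop_zero]
      by_cases hf2 : PySem.Chars.find (s.drop a) pvInst = -1
      · rw [if_pos hf2, pvGoB_neg_one]
        simp only [reduceIte]
        rw [pvAccStep_eq s a s.length (by omega) le_rfl acc]
        have htake : (s.drop a).take (s.length - a) = s.drop a := by
          rw [← List.length_drop]
          exact List.take_length
        rw [htake, pvSplitInst_eq_find (s.drop a), if_pos hf2]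
        simp
      · rw [if_neg hf2]
        have h02 : 0 ≤ PySem.Chars.find (s.drop a) pvInst := by
          have := PySem.Chars.neg_one_le_find (s.drop a) pvInst; omega
        set f2 := (PySem.Chars.find (s.drop a) pvInst).toNat with hf2n
        have hc3 : (a : Int) + PySem.Chars.find (s.drop a) pvInst = ((a + f2 : Nat) : Int) := by
          push_cast; omega
        rw [hc3]
        rw [if_neg (show ¬ ((a + f2 : Nat) : Int) = -1 by omega)]
        have hf2le : f2 ≤ s.length - a := by
          have := PySem.Chars.find_le_length (s.drop a) pvInst
          simp [List.length_drop] at this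
          omega
        rw [pvAccStep_eq s a (a + f2) (by omega) (by omega) acc]
        have hseg : (s.drop a).take (a + f2 - a) = (s.drop a).take f2 := by
          congr 1; omega
        rw [hseg]
        have hback : ((a + f2 : Nat) : Int) = PySem.Chars.findFrom s pvInst (a : Int) := by
          rw [PySem.Chars.findFrom_natCast s pvInst a (by omega), if_neg hf2, hc3]
        rw [hback, ih a _ (by omega) (by omega)]
        rw [pvSplitInst_eq_find (s.drop a), if_neg hf2, ← hf2n]
        simp [List.append_assoc]

-- ===== VERDICT (by name: the statement is the Claim_ definition above) =====
theorem decode_prompt_mistral_spec : Claim_equal_decode_prompt_mistral := by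
  intro enc _
  unfold Spec_decode_prompt_mistral decode_prompt_mistral decode_prompt_mistral_alt
  rw [pvSplitOn_eq]
  have hslice : PySem.List.slice (pvSplitInst enc.toList) (some 1) none
      = (pvSplitInst enc.toList).drop 1 := by
    rw [PySem.List.slice_from_one, ← List.drop_one]
  simp only []
  rw [hslice, pvFoldA]
  have hmain := pvMain enc.toList (enc.toList.length + 1) 0 [] (by omega) (by omega)
  have h0 : ((0 : Nat) : Int) = (0 : Int) := rfl
  rw [h0, PySem.Chars.findFrom_zero, List.drop_zero] at hmain
  rw [hmain]
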